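-- pv_equiv track=rewrite | github.com/EthanFeld/TerKet | src/terket/circuit_spec.py | _normalize_dyadic_phase
-- ===== SOURCE A (Python) =====
-- def _normalize_dyadic_phase(coeff: int, level: int) -> tuple[int, int]:
--     level = int(level)
--     if level < 1:
--         raise ValueError(f"Dyadic precision level must be positive, received {level}.")
--
--     modulus = 1 << level
--     coeff = int(coeff) % modulus
--     while level > 1 and coeff % 2 == 0:
--         coeff //= 2
--         level -= 1
--         modulus >>= 1
--     return coeff % modulus, level
-- ===== SOURCE B (Python) =====
-- def _normalize_dyadic_phase(coeff: int, level: int) -> tuple[int, int]: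
--     level = int(level)
--     if level < 1:
--         raise ValueError(f"Dyadic precision level must be positive, received {level}.")
--     c = int(coeff) % (1 << level)
--     # binary search for the largest shift s in [0, level-1] with 2**s dividing c
--     lo, hi = 0, level - 1
--     while lo < hi:
--         mid = (lo + hi + 1) // 2
--         if c % (1 << mid) == 0:
--             lo = mid
--         else:
--             hi = mid - 1
--     return (c >> lo, level - lo)
-- ===== Notes on version B (the rewrite author's own statement) =====
-- stated objective: alternative
-- what changed: Replaces A's one-bit-at-a-time stripping loop (halve coeff, decrement level, up to level-1 iterations) by a binary search over the exponent for the largest power of two <= 2^(level-1) dividing the reduced coefficient, followed by a single shift; O(log level) divisibility tests instead of O(level) halvings.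
import Mathlib
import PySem

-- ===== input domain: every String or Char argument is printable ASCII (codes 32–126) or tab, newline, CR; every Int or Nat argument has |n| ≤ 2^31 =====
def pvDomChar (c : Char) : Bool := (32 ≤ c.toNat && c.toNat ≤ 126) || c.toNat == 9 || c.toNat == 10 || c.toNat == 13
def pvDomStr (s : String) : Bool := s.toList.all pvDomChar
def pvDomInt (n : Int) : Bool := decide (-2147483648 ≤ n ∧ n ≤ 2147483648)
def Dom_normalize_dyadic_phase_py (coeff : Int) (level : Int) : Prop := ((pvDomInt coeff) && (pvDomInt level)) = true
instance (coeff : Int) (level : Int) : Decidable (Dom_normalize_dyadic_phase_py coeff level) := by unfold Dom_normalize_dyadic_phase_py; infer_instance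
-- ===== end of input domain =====

-- B replaces A's bit-by-bit stripping loop by a binary search (over the exponent) for the
-- largest power of two ≤ 2^(level-1) dividing the reduced coefficient.

-- ===== PORT A =====
-- A's while loop: state (coeff, level, modulus); fuel = the initial level.toNat bounds the
-- iteration count (level decreases every round and the loop stops once level ≤ 1)
def pvALoop : Nat → Int → Int → Int → Int × Int
  | 0, coeff, level, modulus => (PySem.Int.mod coeff modulus, level)
  | fuel+1, coeff, level, modulus =>
    if 1 < level ∧ PySem.Int.mod coeff 2 = 0 then
      pvALoop fuel (PySem.Int.floordiv coeff 2) (level - 1) (modulus >>> (1:Nat))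
    else (PySem.Int.mod coeff modulus, level)

def normalize_dyadic_phase_py (coeff : Int) (level : Int) : Int × Int :=
  if level < 1 then (0, 0)   -- Python raises ValueError here; excluded by Pre_
  else
    let modulus : Int := 1 <<< level.toNat
    pvALoop level.toNat (PySem.Int.mod coeff modulus) level modulus

-- ===== PORT B =====
-- Source B's binary search for lo = max { s ∈ [0, level-1] | 2^s divides c }; fuel = the initial
-- (hi - lo).toNat bounds the iteration count (the gap shrinks every round).
-- '1 << mid' is ported as '1 <<< mid.toNat': exact here since 0 ≤ lo < mid throughout.
def pvBLoop : Nat → Int → Int → Int → Int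
  | 0, _, lo, _ => lo
  | fuel+1, c, lo, hi =>
    if lo < hi then
      if PySem.Int.mod c ((1:Int) <<< (PySem.Int.floordiv (lo + hi + 1) 2).toNat) = 0 then
        pvBLoop fuel c (PySem.Int.floordiv (lo + hi + 1) 2) hi
      else pvBLoop fuel c lo (PySem.Int.floordiv (lo + hi + 1) 2 - 1)
    else lo

def normalize_dyadic_phase_py_alt (coeff : Int) (level : Int) : Int × Int :=
  if level < 1 then (0, 0)   -- Python raises ValueError here; excluded by Pre_
  else
    let c := PySem.Int.mod coeff ((1:Int) <<< level.toNat)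
    let lo := pvBLoop (level - 1).toNat c 0 (level - 1)
    (c >>> lo.toNat, level - lo)

-- ===== PRECONDITION & SPEC =====
-- Pre_ excludes exactly level < 1, where the Python A raises ValueError.
def Pre_normalize_dyadic_phase_py (coeff : Int) (level : Int) : Prop := 1 ≤ level
instance (coeff : Int) (level : Int) : Decidable (Pre_normalize_dyadic_phase_py coeff level) := by unfold Pre_normalize_dyadic_phase_py; infer_instance

def pvWitness_normalize_dyadic_phase_py : Int × Int := (12, 5)

def Spec_normalize_dyadic_phase_py (coeff : Int) (level : Int) (out : Int × Int) : Prop := out = normalize_dyadic_phase_py_alt coeff level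
instance (coeff : Int) (level : Int) (out : Int × Int) : Decidable (Spec_normalize_dyadic_phase_py coeff level out) := by unfold Spec_normalize_dyadic_phase_py; infer_instance

-- ===== CLAIM (what is proved, stated in full; the proofs are below) =====
def Claim_equal_normalize_dyadic_phase_py : Prop := ∀ (coeff : Int) (level : Int), Dom_normalize_dyadic_phase_py coeff level → Pre_normalize_dyadic_phase_py coeff level → Spec_normalize_dyadic_phase_py coeff level (normalize_dyadic_phase_py coeff level)

-- ===== LEMMAS AND PROOFS =====

-- the value both loops compute: the largest s ≤ cap with 2^s ∣ n
def pvS (n cap : Nat) : Nat := Nat.findGreatest (fun k => 2^k ∣ n) cap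

theorem pvS_le (n cap : Nat) : pvS n cap ≤ cap := Nat.findGreatest_le cap

theorem pvS_max (n cap k : Nat) (hk : k ≤ cap) (hd : 2^k ∣ n) : k ≤ pvS n cap :=
  Nat.le_findGreatest hk hd

theorem pvS_char (n cap : Nat) (h0 : n ≠ 0) :
    pvS n cap = min (padicValNat 2 n) cap := by
  haveI : Fact (Nat.Prime 2) := ⟨Nat.prime_two⟩
  unfold pvS
  rw [Nat.findGreatest_eq_iff]
  refine ⟨by omega, fun _ => ?_, fun k hk hkc => ?_⟩
  · rw [padicValNat_dvd_iff_le h0]; omega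
  · rw [padicValNat_dvd_iff_le h0]; omega

theorem pvS_zero (cap : Nat) : pvS 0 cap = cap := by
  unfold pvS
  rw [Nat.findGreatest_eq_iff]
  exact ⟨le_rfl, fun _ => ⟨0, rfl⟩, fun k h1 h2 => by omega⟩

theorem pvS_dvd (n cap : Nat) : 2 ^ pvS n cap ∣ n := by
  by_cases h0 : n = 0
  · exact h0 ▸ dvd_zero _
  · haveI : Fact (Nat.Prime 2) := ⟨Nat.prime_two⟩
    rw [pvS_char n cap h0, padicValNat_dvd_iff_le h0]
    omega

theorem pvS_odd (n cap : Nat) (h : ¬ 2 ∣ n) : pvS n cap = 0 := by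
  have h0 : n ≠ 0 := by rintro rfl; exact h ⟨0, rfl⟩
  rw [pvS_char n cap h0, padicValNat.eq_zero_of_not_dvd h]
  omega

theorem pvS_even (n cap : Nat) (h2 : 2 ∣ n) (h0 : n ≠ 0) (hc : 1 ≤ cap) :
    pvS n cap = pvS (n / 2) (cap - 1) + 1 := by
  haveI : Fact (Nat.Prime 2) := ⟨Nat.prime_two⟩
  have hn2 : n / 2 ≠ 0 := by
    obtain ⟨m, rfl⟩ := h2
    simp only [ne_eq, Nat.mul_div_cancel_left m (by omega : 0 < 2)]
    omega
  have hv : padicValNat 2 (n / 2) = padicValNat 2 n - 1 := padicValNat.div h2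
  have hv1 : 1 ≤ padicValNat 2 n := one_le_padicValNat_of_dvd h0 h2
  rw [pvS_char n cap h0, pvS_char (n / 2) (cap - 1) hn2, hv]
  omega

theorem pvOneShl (k : Nat) : (1:Int) <<< k = ((2^k : Nat) : Int) := by
  rw [show ((1:Int)) = ((1:Nat):Int) from rfl, ← Int.natCast_shiftLeft]
  simp [Nat.shiftLeft_eq]

theorem pvShr (n k : Nat) : ((n:Int)) >>> k = ((n / 2^k : Nat) : Int) := by
  rw [← Int.natCast_shiftRight, Nat.shiftRight_eq_div_pow]

-- A's loop computes (n / 2^s, level - s) with s = pvS n (level.toNat - 1)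
theorem pvALoop_eq : ∀ (fuel : Nat) (n : Nat) (L : Int), 1 ≤ L → L.toNat ≤ fuel + 1 →
    n < 2^L.toNat →
    pvALoop fuel (n : Int) L ((2^L.toNat : Nat) : Int) =
      (((n / 2^(pvS n (L.toNat - 1)) : Nat) : Int), L - (pvS n (L.toNat - 1) : Nat)) := by
  intro fuel
  induction fuel with
  | zero =>
    intro n L hL hf hn
    have hL1 : L = 1 := by omega
    subst hL1
    have : pvS n 0 = 0 := rfl
    simp only [pvALoop, this, pow_zero, Nat.div_one, Int.toNat_one] at *
    rw [PySem.Int.mod_natCast n (2^1), Nat.mod_eq_of_lt hn]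
    norm_num
  | succ fuel ih =>
    intro n L hL hf hn
    rw [pvALoop]
    split_ifs with h
    · -- level > 1 and coeff even
      obtain ⟨hL2, heven⟩ := h
      have h2 : (2:Int) ∣ (n:Int) := (PySem.Int.mod_eq_zero_iff_dvd _ _).mp heven
      have h2n : 2 ∣ n := by exact_mod_cast h2
      have hLt : 2 ≤ L.toNat := by omega
      have hfd : PySem.Int.floordiv (n:Int) 2 = ((n/2 : Nat) : Int) := by
        exact_mod_cast PySem.Int.floordiv_natCast n 2
      have hshr : ((2^L.toNat : Nat) : Int) >>> (1:Nat) = ((2^(L-1).toNat : Nat) : Int) := by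
        rw [pvShr]
        congr 1
        have h2 : 2^L.toNat = 2^(L.toNat - 1) * 2 := by
          rw [← pow_succ]; congr 1; omega
        rw [pow_one, h2, Nat.mul_div_cancel _ (by omega : 0 < 2),
          show (L-1).toNat = L.toNat - 1 by omega]
      rw [hfd, hshr]
      have hn2 : n / 2 < 2^(L-1).toNat := by
        rw [Nat.div_lt_iff_lt_mul (by omega : 0 < 2)]
        calc n < 2^L.toNat := hn
        _ = 2^(L-1).toNat * 2 := by
              rw [show L.toNat = (L-1).toNat + 1 by omega, pow_succ]
      rw [ih (n/2) (L-1) (by omega) (by omega) hn2]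
      by_cases h0 : n = 0
      · subst h0
        simp only [Nat.zero_div, pvS_zero, Prod.mk.injEq]
        exact ⟨trivial, by omega⟩
      · have hs : pvS n (L.toNat - 1) = pvS (n/2) ((L-1).toNat - 1) + 1 := by
          rw [show (L-1).toNat - 1 = (L.toNat - 1) - 1 by omega]
          exact pvS_even n (L.toNat - 1) h2n h0 (by omega)
        rw [hs, Prod.mk.injEq]
        refine ⟨?_, by push_cast; ring⟩
        norm_cast
        rw [Nat.div_div_eq_div_mul, ← pow_succ']
    · -- loop exits: either L = 1 or n is odd
      have hs : pvS n (L.toNat - 1) = 0 := by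
        by_cases hL2 : 1 < L
        · have hodd : ¬ (2:Int) ∣ (n:Int) := fun hd =>
            h ⟨hL2, (PySem.Int.mod_eq_zero_iff_dvd _ _).mpr hd⟩
          exact pvS_odd n _ (fun hd => hodd (by exact_mod_cast hd))
        · have : L.toNat - 1 = 0 := by omega
          rw [this]; rfl
      rw [hs]
      rw [PySem.Int.mod_natCast n (2^L.toNat), Nat.mod_eq_of_lt hn]
      norm_num

-- B's binary search finds pvS n cap on [lo, hi] as long as the answer lies in [lo, hi]
theorem pvBLoop_eq : ∀ (fuel : Nat) (n cap : Nat) (lo hi : Int), 0 ≤ lo → lo ≤ hi →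
    hi ≤ (cap : Int) → lo ≤ (pvS n cap : Int) → (pvS n cap : Int) ≤ hi →
    (hi - lo).toNat ≤ fuel →
    pvBLoop fuel (n : Int) lo hi = (pvS n cap : Int) := by
  intro fuel
  induction fuel with
  | zero =>
    intro n cap lo hi h0 hlh hhc hls hsh hf
    have : lo = hi := by omega
    rw [pvBLoop]; omega
  | succ fuel ih =>
    intro n cap lo hi h0 hlh hhc hls hsh hf
    rw [pvBLoop]
    by_cases hlt : lo < hi
    · rw [if_pos hlt]
      have hmid := PySem.Int.floordiv_two_mid_bounds (show lo + 1 ≤ hi by omega)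
      rw [show lo + 1 + hi = lo + hi + 1 by ring] at hmid
      set mid := PySem.Int.floordiv (lo + hi + 1) 2 with hmiddef
      have hml : lo + 1 ≤ mid := hmid.1
      have hmh : mid ≤ hi := hmid.2
      rw [pvOneShl]
      by_cases hdvd : PySem.Int.mod (n : Int) (((2^mid.toNat : Nat) : Int)) = 0
      · rw [if_pos hdvd]
        -- 2^mid divides n: the answer is ≥ mid
        have hd : ((2^mid.toNat : Nat) : Int) ∣ (n : Int) :=
          (PySem.Int.mod_eq_zero_iff_dvd _ _).mp hdvd
        have hdn : 2^mid.toNat ∣ n := by exact_mod_cast hd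
        have hms : mid ≤ (pvS n cap : Int) := by
          have := pvS_max n cap mid.toNat (by omega) hdn
          omega
        exact ih n cap mid hi (by omega) (by omega) hhc hms hsh (by omega)
      · rw [if_neg hdvd]
        -- 2^mid does not divide n: the answer is < mid
        have hsm : (pvS n cap : Int) < mid := by
          by_contra hge
          have hle : mid.toNat ≤ pvS n cap := by omega
          have : 2^mid.toNat ∣ n := dvd_trans (pow_dvd_pow 2 hle) (pvS_dvd n cap)
          exact hdvd ((PySem.Int.mod_eq_zero_iff_dvd _ _).mpr (by exact_mod_cast this))
        exact ih n cap lo (mid - 1) h0 (by omega) (by omega) hls (by omega) (by omega)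
    · rw [if_neg hlt]
      omega

-- ===== VERDICT (by name: the statement is the Claim_ definition above) =====
theorem normalize_dyadic_phase_py_spec : Claim_equal_normalize_dyadic_phase_py := by
  intro coeff level _ hpre
  unfold Pre_normalize_dyadic_phase_py at hpre
  show normalize_dyadic_phase_py coeff level = normalize_dyadic_phase_py_alt coeff level
  simp only [normalize_dyadic_phase_py, normalize_dyadic_phase_py_alt]
  rw [if_neg (by omega : ¬ level < 1), if_neg (by omega : ¬ level < 1),
    show ((1 <<< level.toNat : Nat) : Int) = ((2^level.toNat : Nat) : Int) by
      rw [Nat.one_shiftLeft],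
    pvOneShl level.toNat]
  have hMpos : (0:Int) < ((2^level.toNat : Nat) : Int) := by positivity
  set c := PySem.Int.mod coeff ((2^level.toNat : Nat) : Int) with hc
  have hc0 : 0 ≤ c := PySem.Int.mod_nonneg coeff hMpos
  have hclt : c < ((2^level.toNat : Nat) : Int) := PySem.Int.mod_lt coeff hMpos
  set n := c.toNat with hn
  have hcn : c = (n : Int) := by omega
  have hnlt : n < 2^level.toNat := by omega
  set s := pvS n (level.toNat - 1) with hs
  have hsle : s ≤ level.toNat - 1 := pvS_le n _
  have hB : pvBLoop (level - 1).toNat c 0 (level - 1) = (s : Int) := by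
    rw [hcn]
    exact pvBLoop_eq (level - 1).toNat n (level.toNat - 1) 0 (level - 1)
      le_rfl (by omega) (by omega) (by omega) (by omega) (by omega)
  have hA : pvALoop level.toNat c level ((2^level.toNat : Nat) : Int) =
      (((n / 2^s : Nat) : Int), level - (s : Int)) := by
    rw [hcn]
    exact pvALoop_eq level.toNat n level hpre (by omega) hnlt
  rw [hA, hB, hcn, pvShr]
  congr 2
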